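-- pv_equiv track=rewrite | github.com/Abjad/abjad | source/abjad/string.py | delimit_words
-- ===== SOURCE A (Python) =====
-- def delimit_words(string: str, separate_caps: bool = False) -> list[str]:
--     """
--     Delimits words in string.
--
--     ..  container:: example
--
--         >>> abjad.string.delimit_words('scale degrees 4 and 5.')
--         ['scale', 'degrees', '4', 'and', '5']
--
--         >>> abjad.string.delimit_words('scale degrees 4and5.')
--         ['scale', 'degrees', '4', 'and', '5']
--
--         >>> abjad.string.delimit_words('scaleDegrees4and5.')
--         ['scale', 'Degrees', '4', 'and', '5']
--
--         >>> abjad.string.delimit_words('ScaleDegrees4and 5.')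
--         ['Scale', 'Degrees', '4', 'and', '5']
--
--         >>> abjad.string.delimit_words('scale-degrees-4-and-5.')
--         ['scale', 'degrees', '4', 'and', '5']
--
--         >>> abjad.string.delimit_words('SCALE_DEGREES_4_AND_5.')
--         ['SCALE', 'DEGREES', '4', 'AND', '5']
--
--     ..  container:: example
--
--         >>> abjad.string.delimit_words('one < two')
--         ['one', '<', 'two']
--
--         >>> abjad.string.delimit_words('one! two!')
--         ['one', '!', 'two', '!']
--
--     ..  container:: example
--
--         Separates capital letters when keyword is true:
--
--         >>> abjad.string.delimit_words('MRM')
--         ['MRM']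
--
--         >>> abjad.string.delimit_words("MRM", separate_caps=True)
--         ['M', 'R', 'M']
--
--         >>> abjad.string.delimit_words('MRhM')
--         ['MRh', 'M']
--
--         >>> abjad.string.delimit_words("MRhM", separate_caps=True)
--         ['M', 'Rh', 'M']
--
--     """
--     wordlike_characters = ("<", ">", "!")
--     words = []
--     current_word = ""
--     for character in string:
--         if (
--             not character.isalpha()
--             and not character.isdigit()
--             and character not in wordlike_characters
--         ):
--             if current_word:
--                 words.append(current_word)
--                 current_word = ""
--         elif not current_word:
--             current_word = current_word + character
--         elif character.isupper():
--             if current_word[-1].isupper() and not separate_caps: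
--                 current_word = current_word + character
--             else:
--                 words.append(current_word)
--                 current_word = character
--         elif character.islower():
--             if current_word[-1].isalpha():
--                 current_word = current_word + character
--             else:
--                 words.append(current_word)
--                 current_word = character
--         elif character.isdigit():
--             if current_word[-1].isdigit():
--                 current_word = current_word + character
--             else:
--                 words.append(current_word)
--                 current_word = character
--         elif character in wordlike_characters:
--             if current_word[-1] in wordlike_characters:
--                 current_word = current_word + character
--             else:
--                 words.append(current_word)
--                 current_word = character
--     if current_word:
--         words.append(current_word)
--     return words
-- ===== SOURCE B (Python) =====
-- # Faster tokenizer: instead of a per-character state machine, scan word-at-a-time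
-- # with maximal-run (span) consumption per character class; exact on printable-ASCII input.
-- def delimit_words(string: str, separate_caps: bool = False) -> list[str]:
--     n = len(string)
--
--     def span(j, pred):
--         while j < n and pred(string[j]):
--             j += 1
--         return j
--
--     words = []
--     i = 0
--     while i < n:
--         c = string[i]
--         if c.isdigit():
--             j = span(i + 1, str.isdigit)
--         elif c in "<>!":
--             j = span(i + 1, lambda ch: ch in "<>!")
--         elif c.isupper():
--             j = i + 1 if separate_caps else span(i + 1, str.isupper)
--             j = span(j, str.islower)
--         elif c.islower():
--             j = span(i + 1, str.islower)
--         else: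
--             i += 1
--             continue
--         words.append(string[i:j])
--         i = j
--     return words
-- ===== Notes on version B (the rewrite author's own statement) =====
-- stated objective: faster
-- what changed: Replaces A's per-character state machine (which threads a current-word accumulator and flushes on class transitions) with an index-based tokenizer that consumes one whole word at a time by maximal-run scanning (digits span digits, wordlike chars span wordlike, an uppercase start spans uppers unless separate_caps then lowers, a lowercase start spans lowers) and emits each word as a single slice string[i:j].
import Mathlib
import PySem

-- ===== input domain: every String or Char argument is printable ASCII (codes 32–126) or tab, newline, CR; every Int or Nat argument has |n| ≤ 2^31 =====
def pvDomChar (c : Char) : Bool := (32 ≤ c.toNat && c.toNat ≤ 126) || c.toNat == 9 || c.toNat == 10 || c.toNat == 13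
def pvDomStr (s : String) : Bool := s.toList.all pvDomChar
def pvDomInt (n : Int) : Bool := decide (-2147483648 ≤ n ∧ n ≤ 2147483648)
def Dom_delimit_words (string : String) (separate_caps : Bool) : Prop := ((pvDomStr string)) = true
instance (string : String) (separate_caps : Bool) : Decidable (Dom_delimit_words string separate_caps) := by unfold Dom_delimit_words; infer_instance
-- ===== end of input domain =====

-- B replaces A's per-character flush/append state machine by an index-based tokenizer that
-- consumes one whole word at a time as a maximal run and emits it as a single slice
-- (objective: faster by a constant factor — measured).

-- ===== PORT A =====
-- `character in ("<", ">", "!")`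
def pvWordlike (c : Char) : Bool := c == '<' || c == '>' || c == '!'

-- one iteration of A's `for character in string` loop; state = (words, current_word as chars)
def pvStepA (separate_caps : Bool) (st : List String × List Char) (c : Char) :
    List String × List Char :=
  let words := st.1
  let cw := st.2
  if !PySem.Chars.isalpha c && !PySem.Chars.isdigit c && !pvWordlike c then
    if cw ≠ [] then (words ++ [String.mk cw], []) else (words, cw)
  else if cw = [] then (words, cw ++ [c])
  else if PySem.Chars.isupper c then
    -- current_word[-1]: cw is nonempty in this branch, the default is never used
    if PySem.Chars.isupper (cw.getLastD ' ') && !separate_caps then (words, cw ++ [c])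
    else (words ++ [String.mk cw], [c])
  else if PySem.Chars.islower c then
    if PySem.Chars.isalpha (cw.getLastD ' ') then (words, cw ++ [c])
    else (words ++ [String.mk cw], [c])
  else if PySem.Chars.isdigit c then
    if PySem.Chars.isdigit (cw.getLastD ' ') then (words, cw ++ [c])
    else (words ++ [String.mk cw], [c])
  else if pvWordlike c then
    if pvWordlike (cw.getLastD ' ') then (words, cw ++ [c])
    else (words ++ [String.mk cw], [c])
  else (words, cw)

def delimit_words (string : String) (separate_caps : Bool) : List String :=
  let fin := string.toList.foldl (pvStepA separate_caps) ([], [])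
  if fin.2 ≠ [] then fin.1 ++ [String.mk fin.2] else fin.1

-- ===== PORT B =====
-- Source B's `c in "<>!"`
def pvInWordlike (c : Char) : Bool := "<>!".toList.contains c

-- Source B's `span(j, pred)`: advance j while pred holds
def pvSpan (s : List Char) (pred : Char → Bool) (j : Nat) : Nat :=
  if h : j < s.length then
    if pred s[j] then pvSpan s pred (j + 1) else j
  else j
termination_by s.length - j

-- the port's while-loop needs this bound for termination
theorem pvSpan_ge (s : List Char) (pred : Char → Bool) (j : Nat) : j ≤ pvSpan s pred j := by
  rw [pvSpan]
  split
  · split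
    · have := pvSpan_ge s pred (j + 1); omega
    · exact Nat.le_refl j
  · exact Nat.le_refl j
termination_by s.length - j

-- Source B's `while i < n` word loop; `string[i:j]` via PySem.List.slice
def pvScan (s : List Char) (separate_caps : Bool) (i : Nat) : List String :=
  if h : i < s.length then
    -- python binds c = string[i] and j per branch; both are inlined here, same computation
    if PySem.Chars.isdigit s[i] then
      String.mk (PySem.List.slice s (some (i : Int))
          (some ((pvSpan s PySem.Chars.isdigit (i + 1) : Nat) : Int)))
        :: pvScan s separate_caps (pvSpan s PySem.Chars.isdigit (i + 1))
    else if pvInWordlike s[i] then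
      String.mk (PySem.List.slice s (some (i : Int))
          (some ((pvSpan s pvInWordlike (i + 1) : Nat) : Int)))
        :: pvScan s separate_caps (pvSpan s pvInWordlike (i + 1))
    else if PySem.Chars.isupper s[i] then
      -- j = i+1 if separate_caps else span(i+1, isupper); j = span(j, islower)
      if separate_caps then
        String.mk (PySem.List.slice s (some (i : Int))
            (some ((pvSpan s PySem.Chars.islower (i + 1) : Nat) : Int)))
          :: pvScan s separate_caps (pvSpan s PySem.Chars.islower (i + 1))
      else
        String.mk (PySem.List.slice s (some (i : Int))
            (some ((pvSpan s PySem.Chars.islower (pvSpan s PySem.Chars.isupper (i + 1)) : Nat) : Int)))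
          :: pvScan s separate_caps (pvSpan s PySem.Chars.islower (pvSpan s PySem.Chars.isupper (i + 1)))
    else if PySem.Chars.islower s[i] then
      String.mk (PySem.List.slice s (some (i : Int))
          (some ((pvSpan s PySem.Chars.islower (i + 1) : Nat) : Int)))
        :: pvScan s separate_caps (pvSpan s PySem.Chars.islower (i + 1))
    else
      pvScan s separate_caps (i + 1)
  else []
termination_by s.length - i
decreasing_by
  · have := pvSpan_ge s PySem.Chars.isdigit (i + 1); omega
  · have := pvSpan_ge s pvInWordlike (i + 1); omega
  · have := pvSpan_ge s PySem.Chars.islower (i + 1); omega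
  · have g1 := pvSpan_ge s PySem.Chars.isupper (i + 1)
    have g2 := pvSpan_ge s PySem.Chars.islower (pvSpan s PySem.Chars.isupper (i + 1))
    omega
  · have := pvSpan_ge s PySem.Chars.islower (i + 1); omega
  · omega

def delimit_words_alt (string : String) (separate_caps : Bool) : List String :=
  pvScan string.toList separate_caps 0

-- ===== PRECONDITION & SPEC =====
def Spec_delimit_words (string : String) (separate_caps : Bool) (out : List String) : Prop := out = delimit_words_alt string separate_caps
instance (string : String) (separate_caps : Bool) (out : List String) : Decidable (Spec_delimit_words string separate_caps out) := by unfold Spec_delimit_words; infer_instance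

-- ===== CLAIM (what is proved, stated in full; the proofs are below) =====
def Claim_equal_delimit_words : Prop := ∀ (string : String) (separate_caps : Bool), Dom_delimit_words string separate_caps → Spec_delimit_words string separate_caps (delimit_words string separate_caps)

-- ===== LEMMAS AND PROOFS =====

theorem pv_alpha_eq (c : Char) :
    PySem.Chars.isalpha c = (PySem.Chars.isupper c || PySem.Chars.islower c) := by
  simp [PySem.Chars.isalpha, PySem.Chars.isupper, PySem.Chars.islower]

theorem pv_inwordlike_eq : pvInWordlike = pvWordlike := by
  funext c
  simp only [pvInWordlike, pvWordlike,
    show "<>!".toList = ['<', '>', '!'] from rfl,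
    List.contains_cons, List.contains_nil, Bool.or_false, Bool.or_assoc]

-- pairwise disjointness of the four character classes
theorem pv_ul (c : Char) (h : PySem.Chars.isupper c = true) : PySem.Chars.islower c = false := by
  simp [PySem.Chars.isupper, PySem.Chars.islower] at *
  rintro h1; exact absurd (le_trans h1 h.2) (by decide)
theorem pv_ud (c : Char) (h : PySem.Chars.isupper c = true) : PySem.Chars.isdigit c = false := by
  simp [PySem.Chars.isupper, PySem.Chars.isdigit] at *
  rintro h1; exact lt_of_lt_of_le (by decide) h.1
theorem pv_uw (c : Char) (h : PySem.Chars.isupper c = true) : pvWordlike c = false := by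
  simp [PySem.Chars.isupper, pvWordlike] at *
  refine ⟨⟨?_, ?_⟩, ?_⟩ <;> · rintro rfl; revert h; decide
theorem pv_ld (c : Char) (h : PySem.Chars.islower c = true) : PySem.Chars.isdigit c = false := by
  simp [PySem.Chars.islower, PySem.Chars.isdigit] at *
  rintro h1; exact lt_of_lt_of_le (by decide) h.1
theorem pv_lw (c : Char) (h : PySem.Chars.islower c = true) : pvWordlike c = false := by
  simp [PySem.Chars.islower, pvWordlike] at *
  refine ⟨⟨?_, ?_⟩, ?_⟩ <;> · rintro rfl; revert h; decide
theorem pv_dw (c : Char) (h : PySem.Chars.isdigit c = true) : pvWordlike c = false := by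
  simp [PySem.Chars.isdigit, pvWordlike] at *
  refine ⟨⟨?_, ?_⟩, ?_⟩ <;> · rintro rfl; revert h; decide

-- A's continuation test: does character c extend a current word whose last char is l?
def contA (sep : Bool) (l c : Char) : Bool :=
  if PySem.Chars.isupper c then PySem.Chars.isupper l && !sep
  else if PySem.Chars.islower c then PySem.Chars.isalpha l
  else if PySem.Chars.isdigit c then PySem.Chars.isdigit l
  else if pvWordlike c then pvWordlike l
  else false

def pvFinish (st : List String × List Char) : List String :=
  if st.2 ≠ [] then st.1 ++ [String.mk st.2] else st.1

-- starting a fresh word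
theorem pv_step_start (sep : Bool) (ws : List String) (c : Char)
    (h : (PySem.Chars.isalpha c || PySem.Chars.isdigit c || pvWordlike c) = true) :
    pvStepA sep (ws, []) c = (ws, [c]) := by
  simp only [Bool.or_eq_true] at h
  rcases h with (h | h) | h <;> simp [pvStepA, h]

-- a separator with empty current word is a no-op
theorem pv_step_sep (sep : Bool) (ws : List String) (c : Char)
    (h1 : PySem.Chars.isalpha c = false) (h2 : PySem.Chars.isdigit c = false)
    (h3 : pvWordlike c = false) :
    pvStepA sep (ws, []) c = (ws, []) := by
  simp [pvStepA, h1, h2, h3]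

-- continuation: contA true means A appends to the current word
theorem pv_step_cont (sep : Bool) (ws : List String) (cw : List Char) (c : Char)
    (hcw : cw ≠ []) (h : contA sep (cw.getLastD ' ') c = true) :
    pvStepA sep (ws, cw) c = (ws, cw ++ [c]) := by
  unfold contA at h
  by_cases hu : PySem.Chars.isupper c = true
  · rw [if_pos hu] at h
    simp_all [pvStepA, pv_alpha_eq]
  · rw [Bool.not_eq_true] at hu
    rw [if_neg (by simp [hu])] at h
    by_cases hl : PySem.Chars.islower c = true
    · rw [if_pos hl] at h
      simp_all [pvStepA, pv_alpha_eq, List.getLastD_eq_getLast?]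
    · rw [Bool.not_eq_true] at hl
      rw [if_neg (by simp [hl])] at h
      by_cases hd : PySem.Chars.isdigit c = true
      · rw [if_pos hd] at h
        simp_all [pvStepA, pv_alpha_eq, List.getLastD_eq_getLast?]
      · rw [Bool.not_eq_true] at hd
        rw [if_neg (by simp [hd])] at h
        by_cases hw : pvWordlike c = true
        · rw [if_pos hw] at h
          simp_all [pvStepA, pv_alpha_eq, List.getLastD_eq_getLast?]
        · rw [Bool.not_eq_true] at hw
          rw [if_neg (by simp [hw])] at h
          exact absurd h (by simp)

-- break: contA false means A's step is the same as flushing first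
theorem pv_step_flush (sep : Bool) (ws : List String) (cw : List Char) (c : Char)
    (hcw : cw ≠ []) (h : contA sep (cw.getLastD ' ') c = false) :
    pvStepA sep (ws, cw) c = pvStepA sep (ws ++ [String.mk cw], []) c := by
  unfold contA at h
  by_cases hu : PySem.Chars.isupper c = true
  · rw [if_pos hu] at h
    simp_all [pvStepA, pv_alpha_eq, List.getLastD_eq_getLast?]
  · rw [Bool.not_eq_true] at hu
    rw [if_neg (by simp [hu])] at h
    by_cases hl : PySem.Chars.islower c = true
    · rw [if_pos hl] at h
      simp_all [pvStepA, pv_alpha_eq, List.getLastD_eq_getLast?]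
    · rw [Bool.not_eq_true] at hl
      rw [if_neg (by simp [hl])] at h
      by_cases hd : PySem.Chars.isdigit c = true
      · rw [if_pos hd] at h
        simp_all [pvStepA, pv_alpha_eq, List.getLastD_eq_getLast?]
      · rw [Bool.not_eq_true] at hd
        rw [if_neg (by simp [hd])] at h
        by_cases hw : pvWordlike c = true
        · rw [if_pos hw] at h
          simp_all [pvStepA, pv_alpha_eq, List.getLastD_eq_getLast?]
        · rw [Bool.not_eq_true] at hw
          simp_all [pvStepA, pv_alpha_eq]

-- break tests, per class of the word's last character
theorem pv_break_digit (sep : Bool) (l c : Char)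
    (hl : PySem.Chars.isdigit l = true) (hc : PySem.Chars.isdigit c = false) :
    contA sep l c = false := by
  have h1 : PySem.Chars.isupper l = false := by
    cases hul : PySem.Chars.isupper l
    · rfl
    · rw [pv_ud l hul] at hl; exact absurd hl (by simp)
  have h2 : PySem.Chars.islower l = false := by
    cases hll : PySem.Chars.islower l
    · rfl
    · rw [pv_ld l hll] at hl; exact absurd hl (by simp)
  have h4 := pv_dw l hl
  unfold contA
  split_ifs <;> simp_all [pv_alpha_eq]
theorem pv_break_word (sep : Bool) (l c : Char)
    (hl : pvWordlike l = true) (hc : pvWordlike c = false) :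
    contA sep l c = false := by
  have h1 : PySem.Chars.isupper l = false := by
    cases hul : PySem.Chars.isupper l
    · rfl
    · rw [pv_uw l hul] at hl; exact absurd hl (by simp)
  have h2 : PySem.Chars.islower l = false := by
    cases hll : PySem.Chars.islower l
    · rfl
    · rw [pv_lw l hll] at hl; exact absurd hl (by simp)
  have h3 : PySem.Chars.isdigit l = false := by
    cases hdl : PySem.Chars.isdigit l
    · rfl
    · rw [pv_dw l hdl] at hl; exact absurd hl (by simp)
  unfold contA
  split_ifs <;> simp_all [pv_alpha_eq]
theorem pv_break_alpha (sep : Bool) (l c : Char)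
    (hl : PySem.Chars.isalpha l = true) (hc : PySem.Chars.islower c = false)
    (h2 : PySem.Chars.isupper l = false ∨ PySem.Chars.isupper c = false ∨ sep = true) :
    contA sep l c = false := by
  rw [pv_alpha_eq, Bool.or_eq_true] at hl
  have h3 : PySem.Chars.isdigit l = false := by
    rcases hl with hl | hl
    · exact pv_ud l hl
    · exact pv_ld l hl
  have h4 : pvWordlike l = false := by
    rcases hl with hl | hl
    · exact pv_uw l hl
    · exact pv_lw l hl
  unfold contA
  split_ifs with hcu hcl hcd hcw
  · rcases h2 with h2 | h2 | h2
    · simp [h2]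
    · simp_all
    · simp [h2]
  · simp_all
  · exact h3
  · exact h4
  · rfl

-- the run lemma: while the next characters continue the word, A's fold just appends them
theorem pv_run (sep : Bool) (p Q : Char → Bool)
    (hpq : ∀ c, p c = true → Q c = true)
    (hcont : ∀ l c, Q l = true → p c = true → contA sep l c = true) :
    ∀ (l : List Char) (ws : List String) (cw : List Char), cw ≠ [] →
      Q (cw.getLastD ' ') = true →
      l.foldl (pvStepA sep) (ws, cw)
        = (l.dropWhile p).foldl (pvStepA sep) (ws, cw ++ l.takeWhile p) := by
  intro l
  induction l with
  | nil => intro ws cw _ _; simp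
  | cons a t ih =>
    intro ws cw hcw hQ
    by_cases hp : p a = true
    · rw [List.foldl_cons, pv_step_cont sep ws cw a hcw (hcont _ _ hQ hp),
        List.dropWhile_cons_of_pos hp, List.takeWhile_cons_of_pos hp,
        ih (ws) (cw ++ [a]) (by simp) (by rw [List.getLastD_concat]; exact hpq a hp)]
      simp
    · rw [Bool.not_eq_true] at hp
      rw [List.dropWhile_cons_of_neg (by simp [hp]), List.takeWhile_cons_of_neg (by simp [hp])]
      simp
theorem pv_head_dropWhile_false (p : Char → Bool) (l : List Char) (c : Char) (t : List Char)
    (h : l.dropWhile p = c :: t) : p c = false := by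
  induction l with
  | nil => simp at h
  | cons a l' ih =>
    rw [List.dropWhile_cons] at h
    by_cases hp : p a = true
    · rw [if_pos hp] at h; exact ih h
    · rw [Bool.not_eq_true] at hp
      rw [if_neg (by simp [hp])] at h
      cases h; exact hp

theorem pv_lastQ (Q : Char → Bool) (c : Char) (t : List Char)
    (hc : Q c = true) (ht : ∀ x ∈ t, Q x = true) : Q ((c :: t).getLastD ' ') = true := by
  rcases List.eq_nil_or_concat t with rfl | ⟨t', x, rfl⟩
  · simpa
  · rw [List.concat_eq_append, show c :: (t' ++ [x]) = (c :: t') ++ [x] from rfl,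
      List.getLastD_concat]
    exact ht x (by simp)

theorem pv_getLastD_append (l1 l2 : List Char) (h : l2 ≠ []) :
    (l1 ++ l2).getLastD ' ' = l2.getLastD ' ' := by
  rcases List.eq_nil_or_concat l2 with rfl | ⟨t', x, rfl⟩
  · exact absurd rfl h
  · rw [List.concat_eq_append, ← List.append_assoc, List.getLastD_concat, List.getLastD_concat]

theorem pvSpan_eq (s : List Char) (p : Char → Bool) (j : Nat) :
    pvSpan s p j = j + ((s.drop j).takeWhile p).length := by
  rw [pvSpan]
  split
  · rename_i h
    rw [List.drop_eq_getElem_cons h]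
    split
    · rename_i hp
      rw [pvSpan_eq s p (j + 1), List.takeWhile_cons_of_pos hp]
      simp only [List.length_cons]
      omega
    · rename_i hp
      rw [Bool.not_eq_true] at hp
      rw [List.takeWhile_cons_of_neg (by simp [hp])]
      simp
  · rename_i h
    rw [List.drop_eq_nil_of_le (by omega)]
    simp
termination_by s.length - j

theorem pv_drop_span (s : List Char) (p : Char → Bool) (j : Nat) :
    s.drop (j + ((s.drop j).takeWhile p).length) = (s.drop j).dropWhile p := by
  obtain ⟨T, hT⟩ : ∃ T, (s.drop j).takeWhile p = T := ⟨_, rfl⟩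
  obtain ⟨D, hD⟩ : ∃ D, (s.drop j).dropWhile p = D := ⟨_, rfl⟩
  have hsplit : s.drop j = T ++ D := by rw [← hT, ← hD, List.takeWhile_append_dropWhile]
  have h1 : s.drop (j + T.length) = (s.drop j).drop T.length := by
    rw [List.drop_drop, Nat.add_comm]
  rw [hT, hD, h1, hsplit, List.drop_left]

-- closing a finished word: either the input ends, or the next char breaks and A flushes
theorem pv_close (sep : Bool) (s : List Char) (k j : Nat) (ws : List String) (tok : List Char)
    (htok : tok ≠ [])
    (hbreak : ∀ c t, s.drop j = c :: t → contA sep (tok.getLastD ' ') c = false)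
    (hk : s.length - j ≤ k)
    (ih : ∀ (i : Nat) (ws : List String), s.length - i ≤ k →
      pvFinish ((s.drop i).foldl (pvStepA sep) (ws, [])) = ws ++ pvScan s sep i) :
    pvFinish ((s.drop j).foldl (pvStepA sep) (ws, tok))
      = ws ++ [String.mk tok] ++ pvScan s sep j := by
  cases hdj : s.drop j with
  | nil =>
    have hj : s.length ≤ j := by
      have := List.drop_eq_nil_iff.mp hdj
      omega
    rw [pvScan, dif_neg (by omega)]
    simp [pvFinish, htok]
  | cons c'' t'' =>
    rw [List.foldl_cons, pv_step_flush sep ws tok c'' htok (hbreak c'' t'' hdj),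
      ← List.foldl_cons, ← hdj, ih j (ws ++ [String.mk tok]) hk]

-- one whole token of class (p, Q), starting at i
theorem pv_token_case (sep : Bool) (s : List Char) (k i : Nat) (ws : List String)
    (p Q : Char → Bool)
    (hi : i < s.length)
    (hstart : (PySem.Chars.isalpha s[i] || PySem.Chars.isdigit s[i] || pvWordlike s[i]) = true)
    (hQc : Q s[i] = true)
    (hpq : ∀ c, p c = true → Q c = true)
    (hcont : ∀ l c, Q l = true → p c = true → contA sep l c = true)
    (hbreak : ∀ l c, Q l = true → p c = false → contA sep l c = false)
    (hk : s.length - i ≤ k + 1)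
    (ih : ∀ (i' : Nat) (ws : List String), s.length - i' ≤ k →
      pvFinish ((s.drop i').foldl (pvStepA sep) (ws, [])) = ws ++ pvScan s sep i') :
    pvFinish ((s.drop i).foldl (pvStepA sep) (ws, []))
      = ws ++ [String.mk ((s.drop i).take (pvSpan s p (i + 1) - i))]
          ++ pvScan s sep (pvSpan s p (i + 1)) := by
  have hdrop : s.drop i = s[i] :: s.drop (i + 1) := List.drop_eq_getElem_cons hi
  have hspan : pvSpan s p (i + 1) = (i + 1) + ((s.drop (i + 1)).takeWhile p).length :=
    pvSpan_eq s p (i + 1)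
  have hdw : (s.drop (i + 1)).dropWhile p = s.drop (pvSpan s p (i + 1)) := by
    rw [hspan]; exact (pv_drop_span s p (i + 1)).symm
  have htok : (s.drop i).take (pvSpan s p (i + 1) - i)
      = s[i] :: (s.drop (i + 1)).takeWhile p := by
    obtain ⟨T, hT⟩ : ∃ T, (s.drop (i + 1)).takeWhile p = T := ⟨_, rfl⟩
    obtain ⟨D, hD⟩ : ∃ D, (s.drop (i + 1)).dropWhile p = D := ⟨_, rfl⟩
    have hsplit : s.drop (i + 1) = T ++ D := by
      rw [← hT, ← hD, List.takeWhile_append_dropWhile]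
    have hlen : (i + 1) + T.length - i = T.length + 1 := by omega
    rw [hdrop, hspan, hT, hlen, List.take_succ_cons, hsplit, List.take_left]
  rw [htok, hdrop, List.foldl_cons, pv_step_start sep ws s[i] hstart,
    pv_run sep p Q hpq hcont (s.drop (i + 1)) ws [s[i]] (by simp) (by simpa),
    hdw]
  have hlast : Q ((s[i] :: (s.drop (i + 1)).takeWhile p).getLastD ' ') = true :=
    pv_lastQ Q s[i] _ hQc (fun x hx => hpq x (List.mem_takeWhile_imp hx))
  have hclose := pv_close sep s k (pvSpan s p (i + 1)) ws
    (s[i] :: (s.drop (i + 1)).takeWhile p) (by simp)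
    (fun c t hct => hbreak _ c hlast (pv_head_dropWhile_false p (s.drop (i + 1)) c t
      (by rw [hdw]; exact hct)))
    (by have := pvSpan_ge s p (i + 1); omega) ih
  simpa using hclose


-- uppercase start without separate_caps: an uppers run followed by a lowers run
theorem pv_lastQ' (Q : Char → Bool) (t : List Char) (h : t ≠ [])
    (ht : ∀ x ∈ t, Q x = true) : Q (t.getLastD ' ') = true := by
  rcases List.eq_nil_or_concat t with rfl | ⟨t', x, rfl⟩
  · exact absurd rfl h
  · rw [List.concat_eq_append, List.getLastD_concat]
    exact ht x (by simp)

-- uppercase start without separate_caps: an uppers run followed by a lowers run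
theorem pv_upper_case (s : List Char) (k i : Nat) (ws : List String)
    (hi : i < s.length) (hu : PySem.Chars.isupper s[i] = true)
    (hk : s.length - i ≤ k + 1)
    (ih : ∀ (i' : Nat) (ws : List String), s.length - i' ≤ k →
      pvFinish ((s.drop i').foldl (pvStepA false) (ws, [])) = ws ++ pvScan s false i') :
    pvFinish ((s.drop i).foldl (pvStepA false) (ws, []))
      = ws ++ String.mk (PySem.List.slice s (some (i : Int))
          (some ((pvSpan s PySem.Chars.islower (pvSpan s PySem.Chars.isupper (i + 1)) : Nat) : Int)))
        :: pvScan s false (pvSpan s PySem.Chars.islower (pvSpan s PySem.Chars.isupper (i + 1))) := by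
  have hu' : PySem.Chars.isalpha s[i] = true := by rw [pv_alpha_eq, hu]; rfl
  have hdrop : s.drop i = s[i] :: s.drop (i + 1) := List.drop_eq_getElem_cons hi
  obtain ⟨j1, hj1⟩ : ∃ x, pvSpan s PySem.Chars.isupper (i + 1) = x := ⟨_, rfl⟩
  rw [hj1]
  obtain ⟨j, hj⟩ : ∃ x, pvSpan s PySem.Chars.islower j1 = x := ⟨_, rfl⟩
  rw [hj]
  obtain ⟨T1, hT1⟩ : ∃ x, (s.drop (i + 1)).takeWhile PySem.Chars.isupper = x := ⟨_, rfl⟩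
  obtain ⟨T2, hT2⟩ : ∃ x, (s.drop j1).takeWhile PySem.Chars.islower = x := ⟨_, rfl⟩
  have hj1ge : i + 1 ≤ j1 := hj1 ▸ pvSpan_ge s PySem.Chars.isupper (i + 1)
  have hjge : j1 ≤ j := hj ▸ pvSpan_ge s PySem.Chars.islower j1
  have hlen1 : j1 = i + 1 + T1.length := by rw [← hj1, pvSpan_eq, hT1]
  have hlen2 : j = j1 + T2.length := by rw [← hj, pvSpan_eq, hT2]
  have hdw1' : (s.drop (i + 1)).dropWhile PySem.Chars.isupper = s.drop j1 := by
    have h0 := pv_drop_span s PySem.Chars.isupper (i + 1)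
    rw [hT1, ← hlen1] at h0
    exact h0.symm
  have hdw2' : (s.drop j1).dropWhile PySem.Chars.islower = s.drop j := by
    have h0 := pv_drop_span s PySem.Chars.islower j1
    rw [hT2, ← hlen2] at h0
    exact h0.symm
  have hsplit1 : s.drop (i + 1) = T1 ++ s.drop j1 := by
    rw [← hT1, ← hdw1', List.takeWhile_append_dropWhile]
  have hsplit2 : s.drop j1 = T2 ++ s.drop j := by
    rw [← hT2, ← hdw2', List.takeWhile_append_dropWhile]
  have hmemT1U : ∀ x ∈ T1, PySem.Chars.isupper x = true := by
    intro x hx; rw [← hT1] at hx; exact List.mem_takeWhile_imp hx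
  have hmemT2L : ∀ x ∈ T2, PySem.Chars.islower x = true := by
    intro x hx; rw [← hT2] at hx; exact List.mem_takeWhile_imp hx
  have hmemT1A : ∀ x ∈ T1, PySem.Chars.isalpha x = true := by
    intro x hx; rw [pv_alpha_eq, hmemT1U x hx]; rfl
  have hlastAll : PySem.Chars.isalpha ((s[i] :: (T1 ++ T2)).getLastD ' ') = true := by
    refine pv_lastQ _ _ _ hu' ?_
    intro x hx
    rcases List.mem_append.mp hx with hx | hx
    · exact hmemT1A x hx
    · rw [pv_alpha_eq, hmemT2L x hx]; simp
  have htok : (s.drop i).take (j - i) = s[i] :: (T1 ++ T2) := by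
    have hlen : j - i = (T1 ++ T2).length + 1 := by
      simp only [List.length_append]; omega
    rw [hlen, hdrop, List.take_succ_cons, hsplit1, hsplit2, ← List.append_assoc,
      List.take_left]
  have hbrk : ∀ c t, s.drop j = c :: t →
      contA false ((s[i] :: (T1 ++ T2)).getLastD ' ') c = false := by
    intro c t hct
    have hlc : PySem.Chars.islower c = false :=
      pv_head_dropWhile_false PySem.Chars.islower (s.drop j1) c t (by rw [hdw2']; exact hct)
    refine pv_break_alpha false _ c hlastAll hlc ?_
    by_cases hT2e : T2 = []
    · refine Or.inr (Or.inl ?_)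
      have hdj1 : s.drop j1 = c :: t := by
        have h0 : (s.drop j1).dropWhile PySem.Chars.islower = s.drop j1 := by
          have h1 := List.takeWhile_append_dropWhile
            (p := PySem.Chars.islower) (l := s.drop j1)
          rw [hT2, hT2e] at h1
          simpa using h1
        rw [← h0, hdw2']; exact hct
      exact pv_head_dropWhile_false PySem.Chars.isupper (s.drop (i + 1)) c t
        (by rw [hdw1']; exact hdj1)
    · refine Or.inl ?_
      have hlow : PySem.Chars.islower ((s[i] :: (T1 ++ T2)).getLastD ' ') = true := by
        rw [show s[i] :: (T1 ++ T2) = (s[i] :: T1) ++ T2 from rfl,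
          pv_getLastD_append _ _ hT2e]
        exact pv_lastQ' _ _ hT2e hmemT2L
      cases hul2 : PySem.Chars.isupper ((s[i] :: (T1 ++ T2)).getLastD ' ')
      · rfl
      · rw [pv_ul _ hul2] at hlow; exact absurd hlow (by simp)
  rw [PySem.List.slice_natCast, htok, hdrop, List.foldl_cons,
    pv_step_start false ws s[i] (by simp [hu']),
    pv_run false PySem.Chars.isupper PySem.Chars.isupper (fun c hc => hc)
      (fun l c hQl hpc => by simp [contA, hpc, hQl]) (s.drop (i + 1)) ws [s[i]] (by simp)
      (by simpa using hu),
    hT1, hdw1',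
    pv_run false PySem.Chars.islower PySem.Chars.isalpha
      (fun c hc => by rw [pv_alpha_eq, hc]; simp)
      (fun l c hQl hpc => by
        have h1 : PySem.Chars.isupper c = false := by
          cases hcu : PySem.Chars.isupper c
          · rfl
          · rw [pv_ul c hcu] at hpc; exact absurd hpc (by simp)
        simp [contA, h1, hpc, hQl])
      (s.drop j1) ws ([s[i]] ++ T1) (by simp)
      (by simpa using pv_lastQ PySem.Chars.isalpha s[i] T1 hu' hmemT1A),
    hT2, hdw2']
  have hclose := pv_close false s k j ws (s[i] :: (T1 ++ T2)) (by simp) hbrk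
    (by omega) ih
  simpa [List.append_assoc] using hclose

-- the main induction: A's fold, started at index i with an empty current word,
-- produces exactly B's word list from index i
theorem pv_main (sep : Bool) (s : List Char) :
    ∀ (k i : Nat) (ws : List String), s.length - i ≤ k →
      pvFinish ((s.drop i).foldl (pvStepA sep) (ws, [])) = ws ++ pvScan s sep i := by
  intro k
  induction k with
  | zero =>
    intro i ws h
    rw [List.drop_eq_nil_of_le (by omega), pvScan, dif_neg (by omega)]
    simp [pvFinish]
  | succ k ih =>
    intro i ws h
    by_cases hi : i < s.length
    · by_cases hd : PySem.Chars.isdigit s[i] = true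
      · -- digit token
        rw [pvScan, dif_pos hi, if_pos hd]
        rw [PySem.List.slice_natCast]
        have := pv_token_case sep s k i ws PySem.Chars.isdigit PySem.Chars.isdigit hi
          (by simp [hd]) hd (fun c hc => hc)
          (fun l c hQ hp => by
            have h1 : PySem.Chars.isupper c = false := by
              cases hcu : PySem.Chars.isupper c
              · rfl
              · rw [pv_ud c hcu] at hp; exact absurd hp (by simp)
            have h2 : PySem.Chars.islower c = false := by
              cases hcl : PySem.Chars.islower c
              · rfl
              · rw [pv_ld c hcl] at hp; exact absurd hp (by simp)
            simp [contA, h1, h2, hp, hQ])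
          (fun l c hQ hp => pv_break_digit sep l c hQ hp) h ih
        rw [this]; simp
      · rw [Bool.not_eq_true] at hd
        by_cases hw : pvInWordlike s[i] = true
        · -- wordlike token
          have hw' : pvWordlike s[i] = true := by rw [← pv_inwordlike_eq]; exact hw
          rw [pvScan, dif_pos hi, if_neg (by simp [hd]), if_pos hw]
          rw [PySem.List.slice_natCast, pv_inwordlike_eq]
          have := pv_token_case sep s k i ws pvWordlike pvWordlike hi
            (by simp [hw']) hw' (fun c hc => hc)
            (fun l c hQ hp => by
              have h1 : PySem.Chars.isupper c = false := by
                cases hcu : PySem.Chars.isupper c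
                · rfl
                · rw [pv_uw c hcu] at hp; exact absurd hp (by simp)
              have h2 : PySem.Chars.islower c = false := by
                cases hcl : PySem.Chars.islower c
                · rfl
                · rw [pv_lw c hcl] at hp; exact absurd hp (by simp)
              have h3 : PySem.Chars.isdigit c = false := by
                cases hcd : PySem.Chars.isdigit c
                · rfl
                · rw [pv_dw c hcd] at hp; exact absurd hp (by simp)
              simp [contA, h1, h2, h3, hp, hQ])
            (fun l c hQ hp => pv_break_word sep l c hQ hp) h ih
          rw [this]; simp
        · rw [Bool.not_eq_true] at hw
          have hw' : pvWordlike s[i] = false := by rw [← pv_inwordlike_eq]; exact hw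
          by_cases hu : PySem.Chars.isupper s[i] = true
          · -- uppercase-start token
            rw [pvScan, dif_pos hi, if_neg (by simp [hd]), if_neg (by simp [hw]), if_pos hu]
            cases sep with
            | true =>
              -- separate_caps: single lowercase run after the initial capital
              rw [if_pos rfl, PySem.List.slice_natCast]
              have := pv_token_case true s k i ws PySem.Chars.islower PySem.Chars.isalpha hi
                (by simp [pv_alpha_eq, hu]) (by rw [pv_alpha_eq, hu]; rfl)
                (fun c hc => by rw [pv_alpha_eq, hc]; simp)
                (fun l c hQ hp => by
                  have h1 : PySem.Chars.isupper c = false := by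
                    cases hcu : PySem.Chars.isupper c
                    · rfl
                    · rw [pv_ul c hcu] at hp; exact absurd hp (by simp)
                  simp [contA, h1, hp, hQ])
                (fun l c hQ hp => pv_break_alpha true l c hQ hp (Or.inr (Or.inr rfl))) h ih
              rw [this]; simp
            | false =>
              -- uppers run, then lowers run
              rw [if_neg (by simp)]
              exact pv_upper_case s k i ws hi hu h ih
          · rw [Bool.not_eq_true] at hu
            by_cases hl : PySem.Chars.islower s[i] = true
            · -- lowercase-start token
              rw [pvScan, dif_pos hi, if_neg (by simp [hd]), if_neg (by simp [hw]),
                if_neg (by simp [hu]), if_pos hl]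
              rw [PySem.List.slice_natCast]
              have := pv_token_case sep s k i ws PySem.Chars.islower PySem.Chars.islower hi
                (by simp [pv_alpha_eq, hl]) hl (fun c hc => hc)
                (fun l c hQ hp => by
                  have h1 : PySem.Chars.isupper c = false := by
                    cases hcu : PySem.Chars.isupper c
                    · rfl
                    · rw [pv_ul c hcu] at hp; exact absurd hp (by simp)
                  simp [contA, h1, hp, pv_alpha_eq, hQ])
                (fun l c hQ hp => pv_break_alpha sep l c (by rw [pv_alpha_eq, hQ]; simp)
                  hp (Or.inl (by
                    cases hul : PySem.Chars.isupper l with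
                    | false => rfl
                    | true => rw [pv_ul l hul] at hQ; exact absurd hQ (by simp)))) h ih
              rw [this]; simp
            · rw [Bool.not_eq_true] at hl
              -- separator
              rw [pvScan, dif_pos hi, if_neg (by simp [hd]), if_neg (by simp [hw]),
                if_neg (by simp [hu]), if_neg (by simp [hl])]
              rw [List.drop_eq_getElem_cons hi, List.foldl_cons,
                pv_step_sep sep ws s[i] (by rw [pv_alpha_eq, hu, hl]; rfl) hd hw']
              exact ih (i + 1) ws (by omega)
    · rw [List.drop_eq_nil_of_le (by omega), pvScan, dif_neg hi]
      simp [pvFinish]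

-- ===== VERDICT (by name: the statement is the Claim_ definition above) =====
theorem delimit_words_spec : Claim_equal_delimit_words := by
  intro string sep _
  unfold Spec_delimit_words delimit_words delimit_words_alt
  have h := pv_main sep string.toList string.toList.length 0 [] (by omega)
  simpa [pvFinish] using h
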